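-- pv_equiv track=rewrite | github.com/noah-lichtenberg/probabilistic-zero-forcing | epzf.py | path_binary_states
-- ===== SOURCE A (Python) =====
-- def path_binary_states(n):
--     results = []
--     center = n // 2 if n % 2 == 1 else n // 2 - 1
--
--     for i in range(n):
--         for j in range(i, n):
--             if i <= center <= j:
--                 s = ['0'] * n
--                 for k in range(i, j + 1):
--                     s[k] = '1'
--                 results.append(''.join(s))
--
--     # Sort lexicographically (i.e. by binary string)
--     results.sort()
--
--     # Convert to integers
--     return [int(x, 2) for x in results]
--
-- n = 12
-- ===== SOURCE B (Python) =====
-- def path_binary_states(n):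
--     # Interval [i, j] (0-indexed, covering the center) as an n-bit binary string
--     # has integer value 2^(n-i) - 2^(n-1-j); generate the values directly and
--     # sort the integers (equal-length binary strings sort lexicographically
--     # exactly as their values sort numerically).
--     center = n // 2 if n % 2 == 1 else n // 2 - 1
--     vals = [2 ** (n - i) - 2 ** (n - 1 - j)
--             for i in range(center + 1)
--             for j in range(center, n)]
--     vals.sort()
--     return vals
-- ===== Notes on version B (the rewrite author's own statement) =====
-- stated objective: faster
-- what changed: Instead of materializing each interval as an n-character binary string, sorting the strings lexicographically and re-parsing them with int(x,2), B computes each interval's integer value directly by the closed form 2**(n-i) - 2**(n-1-j) and sorts the integers (lexicographic order on equal-length binary strings equals numeric order).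
import Mathlib
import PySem

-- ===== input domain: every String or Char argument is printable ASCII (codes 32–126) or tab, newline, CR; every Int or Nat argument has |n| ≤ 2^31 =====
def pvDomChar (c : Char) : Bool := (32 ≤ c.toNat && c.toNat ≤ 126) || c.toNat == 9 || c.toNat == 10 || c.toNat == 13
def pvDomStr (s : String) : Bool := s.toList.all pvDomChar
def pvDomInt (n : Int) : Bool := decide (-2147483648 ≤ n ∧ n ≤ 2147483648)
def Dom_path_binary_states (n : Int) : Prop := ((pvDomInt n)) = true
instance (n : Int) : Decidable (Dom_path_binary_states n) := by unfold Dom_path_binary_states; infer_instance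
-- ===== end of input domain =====

-- B replaces A's string building + lexicographic string sort + int(x,2) re-parsing by the
-- closed-form value 2^(n-i) - 2^(n-1-j) of each interval and a numeric sort (objective: faster).

-- ===== PORT A =====
-- int(x, 2) for the nonempty '0'/'1'-only strings A builds (exact on those: no sign,
-- whitespace, prefix or underscore ever occurs in them); ported by hand because the
-- digit-value helper behind PySem.Int.ofStrBase? is private to PySemCore, so proofs
-- could not unfold it.
def binVal (cs : List Char) : Int :=
  cs.foldl (fun a c => 2 * a + (if c = '1' then 1 else 0)) 0

def path_binary_states (n : Int) : List Int :=
  let center : Int :=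
    if PySem.Int.mod n 2 = 1 then PySem.Int.floordiv n 2 else PySem.Int.floordiv n 2 - 1
  let results : List String :=
    (PySem.List.pyRange 0 n).foldl (fun res i =>
      (PySem.List.pyRange i n).foldl (fun res j =>
        if i ≤ center ∧ center ≤ j then
          -- s = ['0'] * n;  for k in range(i, j+1): s[k] = '1'   (k ≥ 0 here, so .toNat is exact)
          res ++ [String.ofList ((PySem.List.pyRange i (j + 1)).foldl
            (fun s k => s.set k.toNat '1') (PySem.List.pyRepeat ['0'] n))]
        else res) res) []
  (PySem.List.sorted results (fun x => x)).map (fun x => binVal x.toList)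

-- ===== PORT B =====
def path_binary_states_alt (n : Int) : List Int :=
  let center : Int :=
    if PySem.Int.mod n 2 = 1 then PySem.Int.floordiv n 2 else PySem.Int.floordiv n 2 - 1
  -- [2**(n-i) - 2**(n-1-j) for i in range(center+1) for j in range(center, n)]
  -- (exponents are ≥ 0 for every i, j the loops produce, so .toNat is exact)
  let vals : List Int :=
    (PySem.List.pyRange 0 (center + 1)).flatMap (fun i =>
      (PySem.List.pyRange center n).map (fun j =>
        (2 : Int) ^ (n - i).toNat - (2 : Int) ^ (n - 1 - j).toNat))
  PySem.List.sorted vals (fun x => x)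

-- ===== PRECONDITION & SPEC =====
def Spec_path_binary_states (n : Int) (out : List Int) : Prop := out = path_binary_states_alt n
instance (n : Int) (out : List Int) : Decidable (Spec_path_binary_states n out) := by unfold Spec_path_binary_states; infer_instance

-- ===== CLAIM (what is proved, stated in full; the proofs are below) =====
def Claim_equal_path_binary_states : Prop := ∀ (n : Int), Dom_path_binary_states n → Spec_path_binary_states n (path_binary_states n)

-- ===== LEMMAS AND PROOFS =====

-- the center index both programs compute
def pvC (n : Int) : Int :=
  if PySem.Int.mod n 2 = 1 then PySem.Int.floordiv n 2 else PySem.Int.floordiv n 2 - 1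

lemma pvC_bounds (n : Int) : (1 ≤ n → 0 ≤ pvC n ∧ pvC n < n) ∧ (n ≤ 0 → pvC n + 1 ≤ 0) := by
  have h := PySem.Int.floordiv_mul_add_mod n 2
  unfold pvC
  rcases PySem.Int.mod_two_eq n with h2 | h2 <;> rw [h2] <;> simp <;> omega

-- the characters of the interval string: i zeros, (j+1-i) ones, (N-1-j) zeros
def charsOf (N i j : Nat) : List Char :=
  List.replicate i '0' ++ List.replicate (j + 1 - i) '1' ++ List.replicate (N - 1 - j) '0'

-- the interval value B computes
def valOf (n i j : Int) : Int := (2 : Int) ^ (n - i).toNat - (2 : Int) ^ (n - 1 - j).toNat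

lemma take_set_last (s : List Char) (k : Nat) (hk : k < s.length) :
    (s.set k '1').take (k + 1) = s.take k ++ ['1'] := by
  rw [List.take_set, List.set_eq_take_append_cons_drop]
  rw [if_pos (by simp; omega)]
  rw [List.take_take, List.drop_take]
  simp

-- the inner assignment loop: set positions i..j of s to '1'
lemma setLoop (j : Int) : ∀ (d : Nat) (i : Int) (s : List Char), (j + 1 - i).toNat = d →
    0 ≤ i → i ≤ j + 1 → (j : Int) < s.length →
    (PySem.List.pyRange i (j + 1)).foldl (fun s k => s.set k.toNat '1') s
      = s.take i.toNat ++ List.replicate ((j + 1).toNat - i.toNat) '1' ++ s.drop (j + 1).toNat := by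
  intro d
  induction d with
  | zero =>
    intro i s hd h0 h1 h2
    have hij : i = j + 1 := by omega
    subst hij
    rw [PySem.List.pyRange_one_eq_nil le_rfl]
    have : (j + 1).toNat - (j + 1).toNat = 0 := by omega
    rw [List.foldl_nil, this]
    simp [List.take_append_drop]
  | succ q ih =>
    intro i s hd h0 h1 h2
    have hlt : i < j + 1 := by omega
    rw [PySem.List.pyRange_one_cons hlt, List.foldl_cons]
    rw [ih (i + 1) (s.set i.toNat '1') (by omega) (by omega) (by omega) (by simp; omega)]
    have h1' : (i + 1).toNat = i.toNat + 1 := by omega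
    rw [h1', take_set_last s i.toNat (by omega)]
    rw [List.drop_set_of_lt (by omega)]
    have h2' : (j + 1).toNat - i.toNat = ((j + 1).toNat - (i.toNat + 1)) + 1 := by omega
    rw [h2']
    simp [List.replicate_succ, List.append_assoc]

lemma setLoop_replicate (n i j : Int) (h0 : 0 ≤ i) (h1 : i ≤ j) (h2 : j < n) :
    (PySem.List.pyRange i (j + 1)).foldl (fun s k => s.set k.toNat '1')
        (List.replicate n.toNat '0')
      = charsOf n.toNat i.toNat j.toNat := by
  rw [setLoop j ((j + 1 - i).toNat) i _ rfl h0 (by omega) (by simp; omega)]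
  rw [List.take_replicate, List.drop_replicate]
  unfold charsOf
  have e1 : min i.toNat n.toNat = i.toNat := by omega
  have e2 : (j + 1).toNat - i.toNat = j.toNat + 1 - i.toNat := by omega
  have e3 : n.toNat - (j + 1).toNat = n.toNat - 1 - j.toNat := by omega
  rw [e1, e2, e3]

lemma binVal_zeros (k : Nat) (a : Int) :
    (List.replicate k '0').foldl (fun a c => 2 * a + (if c = '1' then 1 else 0)) a = a * 2 ^ k := by
  induction k generalizing a with
  | zero => simp
  | succ m ih =>
    simp only [List.replicate_succ, List.foldl_cons, if_neg (by decide : ¬('0' = '1'))]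
    rw [ih]; ring

lemma binVal_ones (k : Nat) (a : Int) :
    (List.replicate k '1').foldl (fun a c => 2 * a + (if c = '1' then 1 else 0)) a
      = (a + 1) * 2 ^ k - 1 := by
  induction k generalizing a with
  | zero => simp
  | succ m ih =>
    simp only [List.replicate_succ, List.foldl_cons]
    rw [ih]; simp; ring

lemma binVal_charsOf (N i j : Nat) (hij : i ≤ j) (hj : j < N) :
    binVal (charsOf N i j) = 2 ^ (N - i) - 2 ^ (N - 1 - j) := by
  unfold binVal charsOf
  rw [List.foldl_append, List.foldl_append, binVal_zeros, binVal_ones, binVal_zeros]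
  have h1 : (j + 1 - i) + (N - 1 - j) = N - i := by omega
  rw [← h1, pow_add]; ring

lemma binVal_valOf (n i j : Int) (h0 : 0 ≤ i) (h1 : i ≤ j) (h2 : j < n) :
    binVal (charsOf n.toNat i.toNat j.toNat) = valOf n i j := by
  rw [binVal_charsOf n.toNat i.toNat j.toNat (by omega) (by omega)]
  unfold valOf
  congr 2 <;> omega

-- lexicographic comparison of character lists sharing a prefix, at '0' vs '1'
lemma lex_lt (p u v : List Char) : String.ofList (p ++ '0' :: u) < String.ofList (p ++ '1' :: v) := by
  rw [String.lt_iff_toList_lt]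
  simp only [String.toList_ofList]
  rw [show ((p ++ '0' :: u) < (p ++ '1' :: v)) = (p ++ '0' :: u).lt (p ++ '1' :: v) from rfl,
    List.lt_iff_lex_lt]
  induction p with
  | nil => exact List.Lex.rel (by decide)
  | cons a t ih => exact List.Lex.cons ih

lemma repl_split (c : Char) (k m : Nat) (h : m < k) :
    List.replicate k c = List.replicate m c ++ c :: List.replicate (k - m - 1) c := by
  rw [show k = m + ((k - m - 1) + 1) by omega, List.replicate_add, List.replicate_succ]
  simp

lemma charsOf_lt_same (N i j1 j2 : Nat) (h1 : i ≤ j1) (h2 : j1 < j2) (h3 : j2 < N) :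
    String.ofList (charsOf N i j1) < String.ofList (charsOf N i j2) := by
  unfold charsOf
  rw [repl_split '0' (N - 1 - j1) 0 (by omega), repl_split '1' (j2 + 1 - i) (j1 + 1 - i) (by omega)]
  have := lex_lt (List.replicate i '0' ++ List.replicate (j1 + 1 - i) '1')
    (List.replicate (N - 1 - j1 - 0 - 1) '0')
    (List.replicate (j2 + 1 - i - (j1 + 1 - i) - 1) '1' ++ List.replicate (N - 1 - j2) '0')
  simpa [List.append_assoc] using this

lemma charsOf_lt_diff (N i1 i2 j1 j2 : Nat) (h : i2 < i1) (_h1 : i1 ≤ j1) (h2 : i2 ≤ j2) :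
    String.ofList (charsOf N i1 j1) < String.ofList (charsOf N i2 j2) := by
  unfold charsOf
  rw [repl_split '0' i1 i2 h, repl_split '1' (j2 + 1 - i2) 0 (by omega)]
  have := lex_lt (List.replicate i2 '0')
    (List.replicate (i1 - i2 - 1) '0' ++
      (List.replicate (j1 + 1 - i1) '1' ++ List.replicate (N - 1 - j1) '0'))
    (List.replicate (j2 + 1 - i2 - 0 - 1) '1' ++ List.replicate (N - 1 - j2) '0')
  simpa [List.append_assoc] using this

lemma two_pow_mono (a b : Nat) (h : a ≤ b) : (2 : Int) ^ a ≤ 2 ^ b :=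
  pow_le_pow_right₀ (by norm_num) h
lemma two_pow_smono (a b : Nat) (h : a < b) : (2 : Int) ^ a < 2 ^ b :=
  pow_lt_pow_right₀ (by norm_num) h

lemma valOf_lt_same (n i j1 j2 : Int) (h2 : j1 < j2) (h3 : j2 < n) :
    valOf n i j1 < valOf n i j2 := by
  unfold valOf
  have := two_pow_smono (n - 1 - j2).toNat (n - 1 - j1).toNat (by omega)
  linarith

lemma valOf_lt_diff (n i1 i2 j1 j2 : Int) (h : i2 < i1) (h1 : i1 ≤ j1) (h2 : i2 ≤ j2)
    (h3 : j1 < n) : valOf n i1 j1 < valOf n i2 j2 := by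
  unfold valOf
  have ha : (2 : Int) ^ (n - i1).toNat ≤ 2 ^ (n - 1 - i2).toNat := two_pow_mono _ _ (by omega)
  have hb : (2 : Int) ^ (n - 1 - j2).toNat ≤ 2 ^ (n - 1 - i2).toNat := two_pow_mono _ _ (by omega)
  have hc : (2 : Int) ^ (n - 1 - i2).toNat + 2 ^ (n - 1 - i2).toNat ≤ 2 ^ (n - i2).toNat := by
    rw [show (n - i2).toNat = (n - 1 - i2).toNat + 1 by omega, pow_succ]; linarith
  have hd : (0 : Int) < 2 ^ (n - 1 - j1).toNat := by positivity
  linarith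

lemma pyRange_pairwise_lt' (b : Int) : ∀ (d : Nat) (a : Int), (b - a).toNat = d →
    (PySem.List.pyRange a b).Pairwise (· < ·) := by
  intro d
  induction d with
  | zero => intro a h; rw [PySem.List.pyRange_one_eq_nil (by omega)]; exact List.Pairwise.nil
  | succ q ih =>
    intro a h
    rw [PySem.List.pyRange_one_cons (by omega)]
    exact List.Pairwise.cons
      (fun x hx => by have := PySem.List.mem_pyRange_one.mp hx; omega)
      (ih (a + 1) (by omega))

lemma pyRange_pairwise_lt (a b : Int) : (PySem.List.pyRange a b).Pairwise (· < ·) :=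
  pyRange_pairwise_lt' b ((b - a).toNat) a rfl

-- the two sides' common "sorted" list: groups i = c, c-1, …, 0, inside a group j = c, …, n-1
-- pairwise-< of the flattened grouped list, for any projection out of (i, j)
lemma grouped_pairwise {β : Type} [Preorder β] (n c : Int) (f : Int → Int → β)
    (hsame : ∀ i j1 j2, 0 ≤ i → i ≤ c → c ≤ j1 → j1 < j2 → j2 < n → f i j1 < f i j2)
    (hdiff : ∀ i1 i2 j1 j2, 0 ≤ i2 → i2 < i1 → i1 ≤ c → c ≤ j1 → c ≤ j2 → j1 < n → j2 < n →
      f i1 j1 < f i2 j2) :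
    ((PySem.List.pyRange 0 (c + 1)).reverse.flatMap
      (fun i => (PySem.List.pyRange c n).map (f i))).Pairwise (· < ·) := by
  rw [List.flatMap_def, List.pairwise_flatten]
  constructor
  · intro l hl
    rw [List.mem_map] at hl
    obtain ⟨i, hi, rfl⟩ := hl
    rw [List.mem_reverse] at hi
    have hib := PySem.List.mem_pyRange_one.mp hi
    rw [List.pairwise_map]
    refine (pyRange_pairwise_lt c n).imp_of_mem ?_
    intro j1 j2 hj1 hj2 hlt
    have hb1 := PySem.List.mem_pyRange_one.mp hj1
    have hb2 := PySem.List.mem_pyRange_one.mp hj2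
    exact hsame i j1 j2 (by omega) (by omega) (by omega) hlt (by omega)
  · rw [List.map_reverse, List.pairwise_reverse, List.pairwise_map]
    refine (pyRange_pairwise_lt 0 (c + 1)).imp_of_mem ?_
    intro i2 i1 hi2 hi1 hlt x hx y hy
    have hb1 := PySem.List.mem_pyRange_one.mp hi1
    have hb2 := PySem.List.mem_pyRange_one.mp hi2
    rw [List.mem_map] at hx hy
    obtain ⟨j1, hj1, rfl⟩ := hx
    obtain ⟨j2, hj2, rfl⟩ := hy
    have hc1 := PySem.List.mem_pyRange_one.mp hj1
    have hc2 := PySem.List.mem_pyRange_one.mp hj2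
    exact hdiff i1 i2 j1 j2 (by omega) hlt (by omega) (by omega) (by omega) (by omega) (by omega)

-- ===== VERDICT (by name: the statement is the Claim_ definition above) =====
theorem path_binary_states_spec : Claim_equal_path_binary_states := by
  intro n _
  unfold Spec_path_binary_states path_binary_states path_binary_states_alt
  simp only []
  rw [show (if PySem.Int.mod n 2 = 1 then PySem.Int.floordiv n 2 else PySem.Int.floordiv n 2 - 1)
      = pvC n from rfl]
  obtain ⟨hpos, hneg⟩ := pvC_bounds n
  by_cases hn : 1 ≤ n
  · obtain ⟨hc0, hcn⟩ := hpos hn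
    -- A's generation loop as a flatMap of maps over the valid (i, j) rectangle
    have hA : (PySem.List.pyRange 0 n).foldl (fun res i =>
        (PySem.List.pyRange i n).foldl (fun res j =>
          if i ≤ pvC n ∧ pvC n ≤ j then
            res ++ [String.ofList ((PySem.List.pyRange i (j + 1)).foldl
              (fun s k => s.set k.toNat '1') (PySem.List.pyRepeat ['0'] n))]
          else res) res) []
        = (PySem.List.pyRange 0 (pvC n + 1)).flatMap (fun i =>
            (PySem.List.pyRange (pvC n) n).map (fun j =>
              String.ofList (charsOf n.toNat i.toNat j.toNat))) := by
      simp only [PySem.List.foldl_append_ite]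
      rw [PySem.List.foldl_append_eq_flatMap, List.nil_append]
      rw [PySem.List.pyRange_one_append 0 (pvC n + 1) n (by omega) (by omega),
        List.flatMap_append]
      have hnil : (PySem.List.pyRange (pvC n + 1) n).flatMap (fun i =>
          ((PySem.List.pyRange i n).filter (fun j => decide (i ≤ pvC n ∧ pvC n ≤ j))).map
            (fun j => String.ofList ((PySem.List.pyRange i (j + 1)).foldl
              (fun s k => s.set k.toNat '1') (PySem.List.pyRepeat ['0'] n)))) = [] := by
        rw [List.flatMap_eq_nil_iff]
        intro i hi
        have hib := PySem.List.mem_pyRange_one.mp hi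
        rw [List.filter_eq_nil_iff.mpr (fun j hj => by simp; omega), List.map_nil]
      rw [hnil, List.append_nil, List.flatMap_def, List.flatMap_def]
      congr 1
      apply List.map_congr_left
      intro i hi
      have hib := PySem.List.mem_pyRange_one.mp hi
      have hfil : (PySem.List.pyRange i n).filter (fun j => decide (i ≤ pvC n ∧ pvC n ≤ j))
          = PySem.List.pyRange (pvC n) n := by
        rw [PySem.List.pyRange_one_append i (pvC n) n (by omega) (by omega), List.filter_append]
        rw [List.filter_eq_nil_iff.mpr (fun j hj => by
          have := PySem.List.mem_pyRange_one.mp hj; simp; omega)]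
        rw [List.filter_eq_self.mpr (fun j hj => by
          have := PySem.List.mem_pyRange_one.mp hj; simp; omega)]
        rw [List.nil_append]
      rw [hfil]
      apply List.map_congr_left
      intro j hj
      have hjb := PySem.List.mem_pyRange_one.mp hj
      rw [PySem.List.pyRepeat_singleton, setLoop_replicate n i j (by omega) (by omega) (by omega)]
    rw [hA]
    -- B's value list
    set c := pvC n with hcdef
    set Q := PySem.List.pyRange c n with hQ
    set P := PySem.List.pyRange 0 (c + 1) with hP
    -- sorted string list, named explicitly
    have hsortA : PySem.List.sorted
        (P.flatMap (fun i => Q.map (fun j => String.ofList (charsOf n.toNat i.toNat j.toNat))))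
        (fun x => x)
        = P.reverse.flatMap (fun i => Q.map (fun j =>
            String.ofList (charsOf n.toNat i.toNat j.toNat))) := by
      refine PySem.List.sorted_eq_of_perm_of_pairwise_lt _ _ _
        (List.Perm.flatMap_right _ (List.reverse_perm P)) ?_
      refine grouped_pairwise n c _ ?_ ?_
      · intro i j1 j2 hi0 hic hcj hlt hjn
        exact charsOf_lt_same n.toNat i.toNat j1.toNat j2.toNat (by omega) (by omega) (by omega)
      · intro i1 i2 j1 j2 h0 hlt h1 h2 h3 h4 h5
        exact charsOf_lt_diff n.toNat i1.toNat i2.toNat j1.toNat j2.toNat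
          (by omega) (by omega) (by omega)
    have hsortB : PySem.List.sorted
        (P.flatMap (fun i => Q.map (fun j =>
          (2 : Int) ^ (n - i).toNat - (2 : Int) ^ (n - 1 - j).toNat)))
        (fun x => x)
        = P.reverse.flatMap (fun i => Q.map (fun j => valOf n i j)) := by
      refine PySem.List.sorted_eq_of_perm_of_pairwise_lt _ _ _ ?_ ?_
      · exact List.Perm.flatMap_right _ (List.reverse_perm P)
      · refine grouped_pairwise n c _ ?_ ?_
        · intro i j1 j2 hi0 hic hcj hlt hjn
          exact valOf_lt_same n i j1 j2 hlt hjn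
        · intro i1 i2 j1 j2 h0 hlt h1 h2 h3 h4 h5
          exact valOf_lt_diff n i1 i2 j1 j2 hlt (by omega) (by omega) (by omega)
    rw [hsortA, hsortB]
    -- map int(x, 2) over the rearranged string list = the rearranged value list
    rw [List.map_flatMap]
    rw [List.flatMap_def, List.flatMap_def]
    congr 1
    apply List.map_congr_left
    intro i hi
    rw [List.mem_reverse] at hi
    have hib := PySem.List.mem_pyRange_one.mp hi
    rw [List.map_map]
    apply List.map_congr_left
    intro j hj
    have hjb := PySem.List.mem_pyRange_one.mp hj
    simp only [Function.comp_apply, String.toList_ofList]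
    exact binVal_valOf n i j (by omega) (by omega) (by omega)
  · -- n ≤ 0: both sides are []
    have h1 : PySem.List.pyRange 0 n = [] := PySem.List.pyRange_one_eq_nil (by omega)
    have h2 : PySem.List.pyRange 0 (pvC n + 1) = [] :=
      PySem.List.pyRange_one_eq_nil (by have := hneg (by omega); omega)
    rw [h1, h2]
    simp [PySem.List.sorted]
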